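-- pv_equiv track=rewrite | github.com/JelmervanL/LAMAS | mlsolver/model.py | generate_all_relations
-- ===== SOURCE A (Python) =====
-- def generate_all_relations(num_agents, worlds):
--     #Create a dictionary with all relations of agents. Each item in the dictionary contains the relations of a single agent
--     relations = {}
--     for idx in range(num_agents):
--         relations[str(idx)] = []
--
--     #Get roles in first world
--     for first_world_idx in range(len(worlds) - 1):
--         first_world = worlds[first_world_idx]
--         evil_in_first_world = (first_world[1][0], first_world[1][1])
--         good_in_first_world = list(range(num_agents))
--         good_in_first_world.remove(evil_in_first_world[0])
--         good_in_first_world.remove(evil_in_first_world[1])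
--         #Get roles in second world
--         for second_world_idx in range(first_world_idx + 1, len(worlds)):
--             second_world = worlds[second_world_idx]
--             evil_in_second_world = (second_world[1][0], second_world[1][1])
--             good_in_second_world = list(range(num_agents))
--             good_in_second_world.remove(evil_in_second_world[0])
--             good_in_second_world.remove(evil_in_second_world[1])
--             #Check if the same agents are evil in both worlds
--             if evil_in_first_world[0] in evil_in_second_world and evil_in_first_world[1] in evil_in_second_world:
--                 relations[str(evil_in_first_world[0])].append((str(first_world_idx), str(second_world_idx)))
--                 relations[str(evil_in_first_world[1])].append((str(first_world_idx), str(second_world_idx)))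
--             #Create relations of the agents that are good
--             for idx in range(len(good_in_first_world)):
--                 if good_in_first_world[idx] in good_in_second_world:
--                     relations[str(good_in_first_world[idx])].append((str(first_world_idx), str(second_world_idx)))
--     #Convert to sets to have the structure needed for mlsolver and adding symmetric/reflexive edges
--     for idx in range(len(relations)):
--         relations[str(idx)] = set(relations[str(idx)])
--     return relations
-- ===== SOURCE B (Python) =====
-- def generate_all_relations(num_agents, worlds):
--     # Per-agent role signatures computed once, then one pair scan per agent.
--     relations = {str(a): set() for a in range(num_agents)}
--     if len(worlds) >= 2:
--         evil = [(w[1][0], w[1][1]) for w in worlds]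
--         n = len(worlds)
--         for a in range(num_agents):
--             sigs = [frozenset(e) if a in e else None for e in evil]
--             relations[str(a)] = {(str(i), str(j))
--                                  for i in range(n)
--                                  for j in range(i + 1, n)
--                                  if sigs[i] == sigs[j]}
--     return relations
-- ===== Notes on version B (the rewrite author's own statement) =====
-- stated objective: simpler
-- what changed: Instead of A's double scan over world pairs that rebuilds list(range(num_agents)) minus the evil pair for every world of every pair and tests memberships, B precomputes one role signature per world per agent (the frozenset of the evil pair if the agent is evil there, None if good) and emits a world pair for an agent exactly when the two signatures are equal, building each agent's relation set in one comprehension.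
import Mathlib
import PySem

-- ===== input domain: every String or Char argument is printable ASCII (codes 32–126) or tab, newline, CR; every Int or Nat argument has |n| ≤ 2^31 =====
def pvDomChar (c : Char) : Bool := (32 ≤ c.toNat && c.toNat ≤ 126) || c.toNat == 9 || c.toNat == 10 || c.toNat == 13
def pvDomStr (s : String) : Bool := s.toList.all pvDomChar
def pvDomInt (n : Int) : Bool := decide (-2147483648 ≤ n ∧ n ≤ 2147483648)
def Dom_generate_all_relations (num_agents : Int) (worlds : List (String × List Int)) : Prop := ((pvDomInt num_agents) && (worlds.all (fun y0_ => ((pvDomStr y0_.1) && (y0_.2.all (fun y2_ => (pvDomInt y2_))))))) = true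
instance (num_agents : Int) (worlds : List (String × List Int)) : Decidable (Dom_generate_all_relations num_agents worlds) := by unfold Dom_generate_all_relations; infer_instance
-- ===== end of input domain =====

-- B re-implements A by precomputing, per agent, a role signature for every world (the agent's evil
-- pair as an unordered pair, or `none` for good) and emitting a world pair for that agent exactly
-- when the two signatures are equal; this replaces A's per-world-pair rebuilding of good-agent
-- lists and membership tests (objective: simpler).

-- ===== PORT A =====
-- `list(range(num_agents))` with both evil agents removed (list.remove = remove?, ValueError totalized)
def pvGoodA (num_agents e f : Int) : List Int :=
  (PySem.List.remove? ((PySem.List.remove? (PySem.List.pyRange 0 num_agents) e).getD []) f).getD []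

-- the body of A's inner loop over `second_world_idx` (j), for a fixed first world i
def pvPairA (num_agents : Int) (worlds : List (String × List Int)) (i j e1 f1 : Int)
    (good1 : List Int) (d : PySem.Dict String (List (String × String))) :
    PySem.Dict String (List (String × String)) :=
  let sw := PySem.List.pyGetD worlds j ("", [])
  let e2 := (PySem.List.pyGet? sw.2 0).getD 0
  let f2 := (PySem.List.pyGet? sw.2 1).getD 0
  let good2 := pvGoodA num_agents e2 f2
  let d := if (e1 == e2 || e1 == f2) && (f1 == e2 || f1 == f2) then
      (d.modify (PySem.Int.toStr e1) [] (fun v => v ++ [(PySem.Int.toStr i, PySem.Int.toStr j)])).modify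
        (PySem.Int.toStr f1) [] (fun v => v ++ [(PySem.Int.toStr i, PySem.Int.toStr j)])
    else d
  (PySem.List.pyRange 0 (PySem.List.len good1)).foldl (fun d idx =>
    let g := PySem.List.pyGetD good1 idx 0
    if good2.contains g then
      d.modify (PySem.Int.toStr g) [] (fun v => v ++ [(PySem.Int.toStr i, PySem.Int.toStr j)])
    else d) d

def generate_all_relations (num_agents : Int) (worlds : List (String × List Int)) :
    List (String × List (String × String)) :=
  let relations : PySem.Dict String (List (String × String)) :=
    (PySem.List.pyRange 0 num_agents).foldl
      (fun d idx => d.insert (PySem.Int.toStr idx) []) PySem.Dict.empty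
  let n := PySem.List.len worlds
  let relations := (PySem.List.pyRange 0 (n - 1)).foldl (fun d i =>
      let fw := PySem.List.pyGetD worlds i ("", [])
      let e1 := (PySem.List.pyGet? fw.2 0).getD 0
      let f1 := (PySem.List.pyGet? fw.2 1).getD 0
      let good1 := pvGoodA num_agents e1 f1
      (PySem.List.pyRange (i + 1) n).foldl
        (fun d j => pvPairA num_agents worlds i j e1 f1 good1 d) d)
    relations
  let relations := (PySem.List.pyRange 0 (relations.size : Int)).foldl (fun d idx =>
      d.insert (PySem.Int.toStr idx)
        (PySem.Set.ofList ((d.get? (PySem.Int.toStr idx)).getD []))) relations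
  relations.items

-- ===== PORT B =====
-- the role signature of agent a in a world with evil pair (e, f): the evil frozenset {e, f}
-- (represented exactly, as the pair sorted ascending) when a is evil there, none (= Python None) when good
def pvSigB (a e f : Int) : Option (Int × Int) :=
  if a == e || a == f then some (if e ≤ f then (e, f) else (f, e)) else none

-- the set comprehension over index pairs i < j with equal signatures
def pvBPairs (n : Int) (sigs : List (Option (Int × Int))) : List (String × String) :=
  (PySem.List.pyRange 0 n).foldl (fun acc i =>
    (PySem.List.pyRange (i + 1) n).foldl (fun acc j =>
      if PySem.List.pyGetD sigs i none == PySem.List.pyGetD sigs j none then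
        acc ++ [(PySem.Int.toStr i, PySem.Int.toStr j)]
      else acc) acc) []

def generate_all_relations_alt (num_agents : Int) (worlds : List (String × List Int)) :
    List (String × List (String × String)) :=
  let relations : PySem.Dict String (List (String × String)) :=
    (PySem.List.pyRange 0 num_agents).foldl
      (fun d a => d.insert (PySem.Int.toStr a) []) PySem.Dict.empty
  let n := PySem.List.len worlds
  if 2 ≤ n then
    let evil := worlds.map (fun w => ((PySem.List.pyGet? w.2 0).getD 0, (PySem.List.pyGet? w.2 1).getD 0))
    ((PySem.List.pyRange 0 num_agents).foldl (fun d a =>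
      let sigs := evil.map (fun e => pvSigB a e.1 e.2)
      d.insert (PySem.Int.toStr a) (PySem.Set.ofList (pvBPairs n sigs))) relations).items
  else relations.items

-- ===== PRECONDITION & SPEC =====
-- the evil pair (world[1][0], world[1][1]) of a world (index errors totalized to 0)
def pvEvil (w : String × List Int) : Int × Int :=
  ((PySem.List.pyGet? w.2 0).getD 0, (PySem.List.pyGet? w.2 1).getD 0)

-- With at least two worlds, A reads every world's evil pair and calls list.remove on
-- list(range(num_agents)) for both entries: it raises IndexError unless each world's list has two
-- entries, and ValueError unless the two evil agents are distinct members of range(num_agents).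
-- Pre_ excludes exactly those raising inputs; with fewer than two worlds A never touches them.
def Pre_generate_all_relations (num_agents : Int) (worlds : List (String × List Int)) : Prop :=
  worlds.length < 2 ∨ ∀ w ∈ worlds, 2 ≤ w.2.length ∧ (pvEvil w).1 ≠ (pvEvil w).2 ∧
    0 ≤ (pvEvil w).1 ∧ (pvEvil w).1 < num_agents ∧ 0 ≤ (pvEvil w).2 ∧ (pvEvil w).2 < num_agents

instance (num_agents : Int) (worlds : List (String × List Int)) :
    Decidable (Pre_generate_all_relations num_agents worlds) := by
  unfold Pre_generate_all_relations; infer_instance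

def pvWitness_generate_all_relations : Int × (List (String × List Int)) :=
  (3, [("w0", [0, 1]), ("w1", [1, 2]), ("w2", [0, 1])])

def Spec_generate_all_relations (num_agents : Int) (worlds : List (String × List Int))
    (out : List (String × List (String × String))) : Prop :=
  out = generate_all_relations_alt num_agents worlds

instance (num_agents : Int) (worlds : List (String × List Int)) (out : List (String × List (String × String))) : Decidable (Spec_generate_all_relations num_agents worlds out) := by unfold Spec_generate_all_relations; infer_instance

-- ===== CLAIM (what is proved, stated in full; the proofs are below) =====
def Claim_equal_generate_all_relations : Prop := ∀ (num_agents : Int) (worlds : List (String × List Int)), Dom_generate_all_relations num_agents worlds → Pre_generate_all_relations num_agents worlds → Spec_generate_all_relations num_agents worlds (generate_all_relations num_agents worlds)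

-- ===== LEMMAS AND PROOFS =====

/-! ### Injectivity of `PySem.Int.toStr` -/

-- reference form of `Nat.toDigits 10`: most significant digit first, by division
def pvRep (n : Nat) : List Char :=
  if _h : n < 10 then [Nat.digitChar n]
  else pvRep (n / 10) ++ [Nat.digitChar (n % 10)]
decreasing_by exact Nat.div_lt_self (by omega) (by omega)

theorem pvRep_lt {n : Nat} (h : n < 10) : pvRep n = [Nat.digitChar n] := by
  rw [pvRep, dif_pos h]

theorem pvRep_ge {n : Nat} (h : ¬ n < 10) :
    pvRep n = pvRep (n / 10) ++ [Nat.digitChar (n % 10)] := by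
  conv_lhs => rw [pvRep]
  rw [dif_neg h]

theorem pvRep_ne_nil (n : Nat) : pvRep n ≠ [] := by
  by_cases h : n < 10
  · rw [pvRep_lt h]; simp
  · rw [pvRep_ge h]; simp

theorem pv_toDigitsCore_eq (f : Nat) : ∀ n l, n < f →
    Nat.toDigitsCore 10 f n l = pvRep n ++ l := by
  induction f with
  | zero => omega
  | succ f ih =>
    intro n l h
    simp only [Nat.toDigitsCore]
    by_cases h0 : n / 10 = 0
    · have hn : n < 10 := by
        rcases Nat.lt_or_ge n 10 with h' | h'
        · exact h'
        · exfalso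
          have := Nat.div_pos h' (by omega)
          omega
      rw [pvRep_lt hn, Nat.mod_eq_of_lt hn]
      simp [h0]
    · have hlt : n / 10 < f := by
        have := Nat.div_lt_self (show 0 < n by omega) (show 1 < 10 by omega)
        omega
      simp only [h0, if_false]
      rw [ih _ _ hlt, pvRep_ge (fun hlt10 => h0 (Nat.div_eq_of_lt hlt10))]
      simp

theorem pv_toDigits_eq (n : Nat) : Nat.toDigits 10 n = pvRep n := by
  have h := pv_toDigitsCore_eq (n + 1) n [] (by omega)
  simpa [Nat.toDigits] using h

theorem pv_digitChar_ne_dash (k : Nat) (h : k < 10) : Nat.digitChar k ≠ '-' := by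
  interval_cases k <;> decide

theorem pv_dash_not_mem_pvRep (n : Nat) : '-' ∉ pvRep n := by
  induction n using Nat.strong_induction_on with
  | _ n ih =>
    by_cases h : n < 10
    · rw [pvRep_lt h]
      simp only [List.mem_singleton]
      exact fun hh => pv_digitChar_ne_dash n h hh.symm
    · rw [pvRep_ge h]
      intro hm
      rcases List.mem_append.mp hm with hm | hm
      · exact ih (n / 10) (Nat.div_lt_self (by omega) (by omega)) hm
      · exact pv_digitChar_ne_dash (n % 10) (Nat.mod_lt _ (by omega))
          (List.mem_singleton.mp hm).symm

theorem pv_digitChar_inj (a b : Nat) (ha : a < 10) (hb : b < 10)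
    (h : Nat.digitChar a = Nat.digitChar b) : a = b := by
  interval_cases a <;> interval_cases b <;> first | rfl | (exact absurd h (by decide))

theorem pvRep_inj : ∀ a b : Nat, pvRep a = pvRep b → a = b := by
  intro a
  induction a using Nat.strong_induction_on with
  | _ a ih =>
    intro b h
    by_cases ha : a < 10 <;> by_cases hb : b < 10
    · rw [pvRep_lt ha, pvRep_lt hb] at h
      exact pv_digitChar_inj a b ha hb (by simpa using h)
    · exfalso
      rw [pvRep_lt ha, pvRep_ge hb] at h
      have hL := congrArg List.length h
      have hpos := List.length_pos_of_ne_nil (pvRep_ne_nil (b / 10))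
      simp only [List.length_singleton, List.length_append] at hL
      omega
    · exfalso
      rw [pvRep_ge ha, pvRep_lt hb] at h
      have hL := congrArg List.length h
      have hpos := List.length_pos_of_ne_nil (pvRep_ne_nil (a / 10))
      simp only [List.length_singleton, List.length_append] at hL
      omega
    · rw [pvRep_ge ha, pvRep_ge hb] at h
      have h' := congrArg List.reverse h
      simp only [List.reverse_append, List.reverse_singleton, List.singleton_append,
        List.cons.injEq] at h'
      have e1 : a / 10 = b / 10 :=
        ih (a / 10) (Nat.div_lt_self (by omega) (by omega)) _
          (List.reverse_inj.mp h'.2)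
      have e2 : a % 10 = b % 10 :=
        pv_digitChar_inj _ _ (Nat.mod_lt _ (by omega)) (Nat.mod_lt _ (by omega)) h'.1
      omega

theorem pv_toChars_def (n : Int) : PySem.Int.toChars n =
    if n < 0 then '-' :: Nat.toDigits 10 n.natAbs else Nat.toDigits 10 n.toNat := by
  unfold PySem.Int.toChars; rfl

theorem pv_toChars_inj : Function.Injective PySem.Int.toChars := by
  intro a b h
  rw [pv_toChars_def, pv_toChars_def] at h
  simp only [pv_toDigits_eq] at h
  split_ifs at h with h1 h2
  · injection h with _ h'
    have := pvRep_inj _ _ h'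
    omega
  · exact absurd (h ▸ List.mem_cons_self) (pv_dash_not_mem_pvRep _)
  · exact absurd (h.symm ▸ List.mem_cons_self) (pv_dash_not_mem_pvRep _)
  · have := pvRep_inj _ _ h
    omega

theorem pv_toStr_inj : Function.Injective PySem.Int.toStr := by
  intro a b h
  have h' := congrArg String.toList h
  simp only [PySem.Int.toStr] at h'
  simp at h'
  exact pv_toChars_inj h'

theorem pv_beq_toStr (x y : Int) :
    (PySem.Int.toStr x == PySem.Int.toStr y) = (x == y) := by
  by_cases h : x = y
  · simp [h]
  · have hne : PySem.Int.toStr x ≠ PySem.Int.toStr y := fun hh => h (pv_toStr_inj hh)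
    simp [h, hne]

/-! ### Small list/range/set facts -/

theorem pv_pyRange_nil {a b : Int} (h : b ≤ a) : PySem.List.pyRange a b = [] := by
  simp only [PySem.List.pyRange]
  split
  · rfl
  · simp only [show (0:Int) < 1 by omega, if_true]
    have hlt : ¬ a < b := by omega
    simp [hlt]

theorem pv_agents_len (N : Int) :
    PySem.List.pyRange 0 ((PySem.List.pyRange 0 N).length : Int) = PySem.List.pyRange 0 N := by
  by_cases hN : 0 ≤ N
  · obtain ⟨m, rfl⟩ : ∃ m : Nat, N = (m : Int) := ⟨N.toNat, by omega⟩
    rw [PySem.List.pyRange_zero_natCast]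
    simp [PySem.List.pyRange_zero_natCast]
  · have h0 : PySem.List.pyRange 0 N = [] := pv_pyRange_nil (by omega)
    rw [h0]
    exact pv_pyRange_nil (by simp)

theorem pv_update_subset {α : Type} [BEq α] [LawfulBEq α] (xs : List α) (s : PySem.Set α)
    (h : ∀ x ∈ xs, x ∈ s) : PySem.Set.update s xs = s := by
  induction xs generalizing s with
  | nil => rfl
  | cons x t ih =>
    simp only [PySem.Set.update, List.foldl_cons]
    rw [PySem.Set.add_of_mem (h x (by simp))]
    exact ih s (fun y hy => h y (by simp [hy]))

theorem pv_filter_single {α : Type} [BEq α] [LawfulBEq α] (l : List α) (hnd : l.Nodup) (a : α) :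
    l.filter (fun x => x == a) = if a ∈ l then [a] else [] := by
  induction l with
  | nil => simp
  | cons x t ih =>
    rcases List.nodup_cons.mp hnd with ⟨hx, ht⟩
    by_cases hxa : x = a
    · subst hxa
      simp [List.filter_cons, ih ht, hx]
    · have hb : (x == a) = false := by simp [hxa]
      simp only [List.filter_cons, hb, Bool.false_eq_true, if_false, ih ht]
      simp [Ne.symm hxa]

theorem pv_map_filter_eq_flatMap {α β : Type} (p : α → Bool) (f : α → β) (l : List α) :
    (l.filter p).map f = l.flatMap (fun x => if p x then [f x] else []) := by
  induction l with
  | nil => simp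
  | cons x t ih =>
    by_cases hx : p x <;> simp [List.filter_cons, hx, ih]

/-! ### Dict fold lemmas -/

theorem pv_getD_foldl_insert_notmem {κ ν : Type} [BEq κ] [LawfulBEq κ] {β : Type}
    (l : List β) (key : β → κ) (v : PySem.Dict κ ν → β → ν) (d : PySem.Dict κ ν)
    (k : κ) (dflt : ν) (h : ∀ x ∈ l, key x ≠ k) :
    (l.foldl (fun d x => d.insert (key x) (v d x)) d).getD k dflt = d.getD k dflt := by
  induction l generalizing d with
  | nil => rfl
  | cons x t ih =>
    rw [List.foldl_cons, ih _ (fun y hy => h y (List.mem_cons_of_mem _ hy))]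
    apply PySem.Dict.getD_insert_of_ne
    exact fun hk => h x List.mem_cons_self hk.symm

theorem pv_getD_foldl_insert_mem {κ ν : Type} [BEq κ] [LawfulBEq κ] {β : Type}
    (l : List β) (key : β → κ) (v : β → ν) (d : PySem.Dict κ ν) (a : β) (dflt : ν)
    (hnd : (l.map key).Nodup) (ha : a ∈ l) :
    (l.foldl (fun d x => d.insert (key x) (v x)) d).getD (key a) dflt = v a := by
  induction l generalizing d with
  | nil => cases ha
  | cons x t ih =>
    rw [List.map_cons, List.nodup_cons] at hnd
    obtain ⟨hx, ht⟩ := hnd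
    rw [List.foldl_cons]
    rcases List.mem_cons.mp ha with rfl | hat
    · rw [pv_getD_foldl_insert_notmem t key (fun _ y => v y) _ _ _
        (fun y hy hk => hx (by rw [← hk]; exact List.mem_map_of_mem (f := key) hy))]
      apply PySem.Dict.getD_insert_self
    · exact ih _ ht hat

theorem pv_getD_foldl_insert_read {κ ν : Type} [BEq κ] [LawfulBEq κ] {β : Type}
    (l : List β) (key : β → κ) (F : ν → ν) (d : PySem.Dict κ ν) (a : β) (dflt : ν)
    (hnd : (l.map key).Nodup) (ha : a ∈ l) :
    (l.foldl (fun d x => d.insert (key x) (F ((d.get? (key x)).getD dflt))) d).getD (key a) dflt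
      = F (d.getD (key a) dflt) := by
  induction l generalizing d with
  | nil => cases ha
  | cons x t ih =>
    rw [List.map_cons, List.nodup_cons] at hnd
    obtain ⟨hx, ht⟩ := hnd
    rw [List.foldl_cons]
    rcases List.mem_cons.mp ha with rfl | hat
    · rw [pv_getD_foldl_insert_notmem t key
        (fun d y => F ((d.get? (key y)).getD dflt)) _ _ _
        (fun y hy hk => hx (by rw [← hk]; exact List.mem_map_of_mem (f := key) hy))]
      rw [PySem.Dict.getD_eq_get?_getD, PySem.Dict.get?_insert_self]
      simp only [Option.getD_some]
      rw [PySem.Dict.getD_eq_get?_getD]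
    · rw [ih _ ht hat]
      have hne : key a ≠ key x := fun hk => hx (hk ▸ List.mem_map_of_mem (f := key) hat)
      congr 1
      apply PySem.Dict.getD_insert_of_ne
      exact hne

/-! ### Shorthand for the data both ports compute -/

def pvAgents (N : Int) : List Int := PySem.List.pyRange 0 N

def pvKeys (N : Int) : List String := (pvAgents N).map PySem.Int.toStr

def pvRel0 (N : Int) : PySem.Dict String (List (String × String)) :=
  (pvAgents N).foldl (fun d idx => d.insert (PySem.Int.toStr idx) []) PySem.Dict.empty

def pvP (i j : Int) : String × String := (PySem.Int.toStr i, PySem.Int.toStr j)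

def pvEvts (N i j e1 f1 e2 f2 : Int) : List (String × (String × String)) :=
  (if (e1 == e2 || e1 == f2) && (f1 == e2 || f1 == f2) then
    [(PySem.Int.toStr e1, pvP i j), (PySem.Int.toStr f1, pvP i j)]
  else [])
  ++ ((pvGoodA N e1 f1).filter (fun g => (pvGoodA N e2 f2).contains g)).map
       (fun g => (PySem.Int.toStr g, pvP i j))

def pvWAt (worlds : List (String × List Int)) (i : Int) : String × List Int :=
  PySem.List.pyGetD worlds i ("", [])

def pvAllEvts (N : Int) (worlds : List (String × List Int)) (n : Int) :
    List (String × (String × String)) :=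
  (PySem.List.pyRange 0 (n - 1)).flatMap (fun i =>
    (PySem.List.pyRange (i + 1) n).flatMap (fun j =>
      pvEvts N i j (pvEvil (pvWAt worlds i)).1 (pvEvil (pvWAt worlds i)).2
        (pvEvil (pvWAt worlds j)).1 (pvEvil (pvWAt worlds j)).2))

def pvRel1 (N : Int) (worlds : List (String × List Int)) :
    PySem.Dict String (List (String × String)) :=
  (PySem.List.pyRange 0 (PySem.List.len worlds - 1)).foldl (fun d i =>
    let fw := PySem.List.pyGetD worlds i ("", [])
    let e1 := (PySem.List.pyGet? fw.2 0).getD 0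
    let f1 := (PySem.List.pyGet? fw.2 1).getD 0
    let good1 := pvGoodA N e1 f1
    (PySem.List.pyRange (i + 1) (PySem.List.len worlds)).foldl
      (fun d j => pvPairA N worlds i j e1 f1 good1 d) d) (pvRel0 N)

def pvSigList (worlds : List (String × List Int)) (a : Int) : List (Option (Int × Int)) :=
  (worlds.map pvEvil).map (fun e => pvSigB a e.1 e.2)

theorem pv_nodup_keys (N : Int) : (pvKeys N).Nodup :=
  (PySem.List.nodup_pyRange_one 0 N).map (f := PySem.Int.toStr) pv_toStr_inj

theorem pv_rel0_items (N : Int) :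
    (pvRel0 N).items = (pvAgents N).map (fun a => (PySem.Int.toStr a, ([] : List (String × String)))) := by
  have h := PySem.Dict.items_foldl_insert_fresh (pvAgents N) PySem.Int.toStr
    (fun _ => ([] : List (String × String))) PySem.Dict.empty
    (fun a _ => PySem.Dict.contains_empty _) (pv_nodup_keys N)
  simpa [pvRel0] using h

theorem pv_rel0_keys (N : Int) : (pvRel0 N).keys = pvKeys N := by
  show (pvRel0 N).items.map Prod.fst = _
  rw [pv_rel0_items]
  simp [pvKeys, List.map_map, Function.comp]

theorem pv_rel0_getD (N : Int) {a : Int} (ha : a ∈ pvAgents N) :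
    (pvRel0 N).getD (PySem.Int.toStr a) [] = [] :=
  pv_getD_foldl_insert_mem (pvAgents N) PySem.Int.toStr (fun _ => []) _ a []
    (pv_nodup_keys N) ha

/-! ### Rewriting A's nested loops into one event fold -/

theorem pv_foldl_two (c : Bool) (k1 k2 : String) (P : String × String)
    (d : PySem.Dict String (List (String × String))) :
    (if c then [(k1, P), (k2, P)] else []).foldl
      (fun d p => d.modify p.1 [] (fun v => v ++ [p.2])) d
    = if c then (d.modify k1 [] (fun v => v ++ [P])).modify k2 [] (fun v => v ++ [P]) else d := by
  cases c <;> rfl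

theorem pv_goodloop (good1 good2 : List Int) (P : String × String)
    (d : PySem.Dict String (List (String × String))) :
    (PySem.List.pyRange 0 (PySem.List.len good1)).foldl (fun d' idx =>
      if good2.contains (PySem.List.pyGetD good1 idx 0) then
        d'.modify (PySem.Int.toStr (PySem.List.pyGetD good1 idx 0)) [] (fun v => v ++ [P])
      else d') d
    = ((good1.filter (fun g => good2.contains g)).map (fun g => (PySem.Int.toStr g, P))).foldl
        (fun d p => d.modify p.1 [] (fun v => v ++ [p.2])) d := by
  refine (PySem.List.foldl_pyRange_zero_pyGetD good1 0
    (fun d' g => if good2.contains g then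
      d'.modify (PySem.Int.toStr g) [] (fun v => v ++ [P]) else d') d).trans ?_
  induction good1 generalizing d with
  | nil => rfl
  | cons x t ih =>
    rw [List.foldl_cons, List.filter_cons]
    by_cases hx : good2.contains x = true
    · rw [if_pos hx, if_pos hx, List.map_cons, List.foldl_cons]
      exact ih _
    · rw [if_neg hx, if_neg hx]
      exact ih _

theorem pv_pairA_core (N i j e1 f1 e2 f2 : Int)
    (d : PySem.Dict String (List (String × String))) :
    (PySem.List.pyRange 0 (PySem.List.len (pvGoodA N e1 f1))).foldl (fun d' idx =>
      if (pvGoodA N e2 f2).contains (PySem.List.pyGetD (pvGoodA N e1 f1) idx 0) then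
        d'.modify (PySem.Int.toStr (PySem.List.pyGetD (pvGoodA N e1 f1) idx 0)) []
          (fun v => v ++ [pvP i j])
      else d')
      (if (e1 == e2 || e1 == f2) && (f1 == e2 || f1 == f2) then
        (d.modify (PySem.Int.toStr e1) [] (fun v => v ++ [pvP i j])).modify
          (PySem.Int.toStr f1) [] (fun v => v ++ [pvP i j])
      else d)
    = (pvEvts N i j e1 f1 e2 f2).foldl
        (fun d p => d.modify p.1 [] (fun v => v ++ [p.2])) d := by
  unfold pvEvts
  rw [List.foldl_append, pv_foldl_two]
  exact pv_goodloop (pvGoodA N e1 f1) (pvGoodA N e2 f2) (pvP i j) _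

theorem pv_pairA_eq (N : Int) (worlds : List (String × List Int)) (i j e1 f1 : Int)
    (d : PySem.Dict String (List (String × String))) :
    pvPairA N worlds i j e1 f1 (pvGoodA N e1 f1) d =
      (pvEvts N i j e1 f1 (pvEvil (pvWAt worlds j)).1 (pvEvil (pvWAt worlds j)).2).foldl
        (fun d p => d.modify p.1 [] (fun v => v ++ [p.2])) d :=
  pv_pairA_core N i j e1 f1 (pvEvil (pvWAt worlds j)).1 (pvEvil (pvWAt worlds j)).2 d

theorem pv_inner_eq (N : Int) (worlds : List (String × List Int)) (i : Int)
    (d : PySem.Dict String (List (String × String))) :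
    (PySem.List.pyRange (i + 1) (PySem.List.len worlds)).foldl
      (fun d j => pvPairA N worlds i j (pvEvil (pvWAt worlds i)).1 (pvEvil (pvWAt worlds i)).2
        (pvGoodA N (pvEvil (pvWAt worlds i)).1 (pvEvil (pvWAt worlds i)).2) d) d
    = ((PySem.List.pyRange (i + 1) (PySem.List.len worlds)).flatMap (fun j =>
        pvEvts N i j (pvEvil (pvWAt worlds i)).1 (pvEvil (pvWAt worlds i)).2
          (pvEvil (pvWAt worlds j)).1 (pvEvil (pvWAt worlds j)).2)).foldl
        (fun d p => d.modify p.1 [] (fun v => v ++ [p.2])) d := by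
  rw [List.foldl_flatMap]
  apply PySem.List.foldl_congr_mem
  intro acc j _
  exact pv_pairA_eq N worlds i j _ _ acc

theorem pv_rel1_eq (N : Int) (worlds : List (String × List Int)) :
    pvRel1 N worlds = (pvAllEvts N worlds (PySem.List.len worlds)).foldl
      (fun d p => d.modify p.1 [] (fun v => v ++ [p.2])) (pvRel0 N) := by
  unfold pvRel1 pvAllEvts
  rw [List.foldl_flatMap]
  apply PySem.List.foldl_congr_mem
  intro acc i _
  exact pv_inner_eq N worlds i acc

/-! ### Good lists -/

theorem pv_goodA_subset (N e f : Int) : ∀ g ∈ pvGoodA N e f, g ∈ PySem.List.pyRange 0 N := by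
  have h1 : ∀ (xs : List Int) (v : Int) (g : Int),
      g ∈ (PySem.List.remove? xs v).getD [] → g ∈ xs := by
    intro xs v g hg
    rcases hm : PySem.List.remove? xs v with _ | l
    · rw [hm] at hg; cases hg
    · have hv : v ∈ xs := by
        by_contra hv
        rw [(PySem.List.remove?_eq_none_iff xs v).mpr hv] at hm; cases hm
      rw [hm] at hg
      simp only [Option.getD_some] at hg
      rw [PySem.List.remove?_eq_some_erase xs v hv] at hm
      obtain rfl := Option.some.inj hm
      exact List.erase_subset hg
  intro g hg
  unfold pvGoodA at hg
  exact h1 _ e _ (h1 _ f _ hg)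

theorem pv_nodup_goodA (N e f : Int) : (pvGoodA N e f).Nodup := by
  have h1 : ∀ (xs : List Int) (v : Int), xs.Nodup →
      ((PySem.List.remove? xs v).getD []).Nodup := by
    intro xs v h
    rcases hm : PySem.List.remove? xs v with _ | l
    · simp
    · have hv : v ∈ xs := by
        by_contra hv
        rw [(PySem.List.remove?_eq_none_iff xs v).mpr hv] at hm; cases hm
      simp only [Option.getD_some]
      rw [PySem.List.remove?_eq_some_erase xs v hv] at hm
      obtain rfl := Option.some.inj hm
      exact h.erase v
  exact h1 _ f (h1 _ e (PySem.List.nodup_pyRange_one 0 N))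

theorem pv_mem_goodA {N e f : Int} (he : 0 ≤ e ∧ e < N) (hf : 0 ≤ f ∧ f < N) (hef : e ≠ f)
    (a : Int) : a ∈ pvGoodA N e f ↔ (0 ≤ a ∧ a < N ∧ a ≠ e ∧ a ≠ f) := by
  have hmem_e : e ∈ PySem.List.pyRange 0 N := PySem.List.mem_pyRange_one.mpr ⟨he.1, he.2⟩
  have hnd := PySem.List.nodup_pyRange_one 0 N
  have hmem_f : f ∈ (PySem.List.pyRange 0 N).erase e :=
    hnd.mem_erase_iff.mpr ⟨Ne.symm hef, PySem.List.mem_pyRange_one.mpr ⟨hf.1, hf.2⟩⟩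
  have hgood : pvGoodA N e f = ((PySem.List.pyRange 0 N).erase e).erase f := by
    unfold pvGoodA
    rw [PySem.List.remove?_eq_some_erase _ e hmem_e]
    simp only [Option.getD_some]
    rw [PySem.List.remove?_eq_some_erase _ f hmem_f]
    rfl
  rw [hgood, (hnd.erase e).mem_erase_iff, hnd.mem_erase_iff, PySem.List.mem_pyRange_one]
  tauto

/-! ### The per-pair core equivalence -/

theorem pv_perPair {N a e1 f1 e2 f2 : Int} (i j : Int)
    (ha : 0 ≤ a ∧ a < N)
    (h1 : e1 ≠ f1) (re1 : 0 ≤ e1 ∧ e1 < N) (rf1 : 0 ≤ f1 ∧ f1 < N)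
    (h2 : e2 ≠ f2) (re2 : 0 ≤ e2 ∧ e2 < N) (rf2 : 0 ≤ f2 ∧ f2 < N) :
    ((pvEvts N i j e1 f1 e2 f2).filter (fun p => p.1 == PySem.Int.toStr a)).map (fun p => p.2)
      = if pvSigB a e1 f1 == pvSigB a e2 f2 then [pvP i j] else [] := by
  unfold pvEvts
  rw [List.filter_append, List.map_append]
  have hgood : (((pvGoodA N e1 f1).filter (fun g => (pvGoodA N e2 f2).contains g)).map
      (fun g => (PySem.Int.toStr g, pvP i j))).filter (fun p => p.1 == PySem.Int.toStr a)
      = if a ∈ (pvGoodA N e1 f1).filter (fun g => (pvGoodA N e2 f2).contains g) then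
          [(PySem.Int.toStr a, pvP i j)] else [] := by
    rw [List.filter_map]
    have hcomp : ((fun p : String × (String × String) => p.1 == PySem.Int.toStr a) ∘
        (fun g => (PySem.Int.toStr g, pvP i j))) = fun g => g == a := by
      funext g
      simp only [Function.comp]
      rw [pv_beq_toStr]
    rw [hcomp, pv_filter_single _ ((pv_nodup_goodA N e1 f1).filter _) a]
    split <;> simp
  rw [hgood]
  have hmem : a ∈ (pvGoodA N e1 f1).filter (fun g => (pvGoodA N e2 f2).contains g) ↔
      ((a ≠ e1 ∧ a ≠ f1) ∧ (a ≠ e2 ∧ a ≠ f2)) := by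
    rw [List.mem_filter, pv_mem_goodA re1 rf1 h1, List.contains_eq_mem,
      decide_eq_true_iff, pv_mem_goodA re2 rf2 h2]
    constructor
    · rintro ⟨⟨_, _, u1, u2⟩, _, _, v1, v2⟩; exact ⟨⟨u1, u2⟩, v1, v2⟩
    · rintro ⟨⟨u1, u2⟩, v1, v2⟩; exact ⟨⟨ha.1, ha.2, u1, u2⟩, ha.1, ha.2, v1, v2⟩
  by_cases hae : a = e1 ∨ a = f1
  · -- a is evil in the first world: the good branch never emits for a
    have hng : a ∉ (pvGoodA N e1 f1).filter (fun g => (pvGoodA N e2 f2).contains g) := by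
      rw [hmem]; tauto
    rw [if_neg hng]
    by_cases hc : ((e1 == e2 || e1 == f2) && (f1 == e2 || f1 == f2)) = true
    · have hsets : (e1 = e2 ∨ e1 = f2) ∧ (f1 = e2 ∨ f1 = f2) := by simpa using hc
      have hae' : (a == e1 || a == f1) = true := by
        simp only [Bool.or_eq_true, beq_iff_eq]; exact hae
      have haj : (a == e2 || a == f2) = true := by
        simp only [Bool.or_eq_true, beq_iff_eq]; omega
      have hsig : (pvSigB a e1 f1 == pvSigB a e2 f2) = true := by
        unfold pvSigB
        rw [hae', haj]
        simp only [if_true, beq_iff_eq, Option.some.injEq]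
        split_ifs <;> simp only [Prod.mk.injEq] <;> omega
      rw [hc, if_pos hsig]
      rcases hae with rfl | rfl
      · have hne : (PySem.Int.toStr f1 == PySem.Int.toStr a) = false := by
          rw [pv_beq_toStr]; simp only [beq_eq_false_iff_ne, Ne]; omega
        simp [List.filter_cons, hne]
      · have hne : (PySem.Int.toStr e1 == PySem.Int.toStr a) = false := by
          rw [pv_beq_toStr]; simp only [beq_eq_false_iff_ne, Ne]; omega
        simp [List.filter_cons, hne]
    · have hc' : ¬((e1 = e2 ∨ e1 = f2) ∧ (f1 = e2 ∨ f1 = f2)) := by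
        intro hh
        exact hc (by simp only [Bool.and_eq_true, Bool.or_eq_true, beq_iff_eq]; exact hh)
      have hae' : (a == e1 || a == f1) = true := by
        simp only [Bool.or_eq_true, beq_iff_eq]; exact hae
      have hsig : (pvSigB a e1 f1 == pvSigB a e2 f2) = false := by
        unfold pvSigB
        rw [hae']
        by_cases haj : (a == e2 || a == f2) = true
        · rw [haj]
          simp only [if_true, beq_eq_false_iff_ne, Ne, Option.some.injEq]
          intro hpair
          apply hc'
          split_ifs at hpair <;> simp only [Prod.mk.injEq] at hpair <;>
            constructor <;> omega
        · rw [Bool.not_eq_true] at haj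
          rw [haj]
          simp
      rw [Bool.not_eq_true] at hc
      rw [hc, hsig]
      simp
  · -- a is good (or absent) in the first world
    have hae1 : a ≠ e1 := fun h => hae (Or.inl h)
    have hae2 : a ≠ f1 := fun h => hae (Or.inr h)
    have hsig1 : pvSigB a e1 f1 = none := by
      unfold pvSigB
      have hb : (a == e1 || a == f1) = false := by
        simp only [Bool.or_eq_false_iff, beq_eq_false_iff_ne, Ne]
        exact ⟨hae1, hae2⟩
      rw [hb]
      simp
    have hne1 : (PySem.Int.toStr e1 == PySem.Int.toStr a) = false := by
      rw [pv_beq_toStr]; simp only [beq_eq_false_iff_ne, Ne]; omega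
    have hne2 : (PySem.Int.toStr f1 == PySem.Int.toStr a) = false := by
      rw [pv_beq_toStr]; simp only [beq_eq_false_iff_ne, Ne]; omega
    by_cases haj : a = e2 ∨ a = f2
    · have hng : a ∉ (pvGoodA N e1 f1).filter (fun g => (pvGoodA N e2 f2).contains g) := by
        rw [hmem]; tauto
      have hsig2 : pvSigB a e2 f2 ≠ none := by
        unfold pvSigB
        have hb : (a == e2 || a == f2) = true := by
          simp only [Bool.or_eq_true, beq_iff_eq]; exact haj
        rw [hb]
        simp
      have hsig : (pvSigB a e1 f1 == pvSigB a e2 f2) = false := by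
        rw [hsig1]
        simp only [beq_eq_false_iff_ne, Ne]
        exact fun hh => hsig2 hh.symm
      rw [if_neg hng, hsig]
      simp only [Bool.false_eq_true, if_false, List.map_nil, List.append_nil]
      split
      · simp [hne1, hne2]
      · simp
    · have hg : a ∈ (pvGoodA N e1 f1).filter (fun g => (pvGoodA N e2 f2).contains g) := by
        rw [hmem]
        exact ⟨⟨hae1, hae2⟩, fun h => haj (Or.inl h), fun h => haj (Or.inr h)⟩
      have hsig2 : pvSigB a e2 f2 = none := by
        unfold pvSigB
        have hb : (a == e2 || a == f2) = false := by
          simp only [Bool.or_eq_false_iff, beq_eq_false_iff_ne, Ne]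
          exact ⟨fun h => haj (Or.inl h), fun h => haj (Or.inr h)⟩
        rw [hb]
        simp
      have hsig : (pvSigB a e1 f1 == pvSigB a e2 f2) = true := by
        rw [hsig1, hsig2]; rfl
      rw [if_pos hg, hsig, if_pos rfl]
      split <;> simp [List.filter_cons, hne1, hne2, pvP]

/-! ### Index access and per-agent pair lists -/

theorem pv_wAt_mem (worlds : List (String × List Int)) {i : Int}
    (h0 : 0 ≤ i) (h1 : i < (worlds.length : Int)) : pvWAt worlds i ∈ worlds := by
  unfold pvWAt
  rw [PySem.List.pyGetD_eq_getElem worlds ("", []) h0 h1]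
  exact List.getElem_mem _

theorem pv_sig_at (worlds : List (String × List Int)) (a : Int) {i : Int}
    (h0 : 0 ≤ i) (h1 : i < (worlds.length : Int)) :
    PySem.List.pyGetD (pvSigList worlds a) i none
      = pvSigB a (pvEvil (pvWAt worlds i)).1 (pvEvil (pvWAt worlds i)).2 := by
  unfold pvSigList pvWAt
  rw [List.map_map]
  rw [PySem.List.pyGetD_eq_getElem _ none h0 (by simpa using h1)]
  rw [List.getElem_map]
  rw [PySem.List.pyGetD_eq_getElem worlds ("", []) h0 h1]
  rfl

theorem pv_bPairs_flatMap (n : Int) (sigs : List (Option (Int × Int))) :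
    pvBPairs n sigs = (PySem.List.pyRange 0 n).flatMap (fun i =>
      ((PySem.List.pyRange (i + 1) n).filter (fun j =>
        PySem.List.pyGetD sigs i none == PySem.List.pyGetD sigs j none)).map
        (fun j => (PySem.Int.toStr i, PySem.Int.toStr j))) := by
  have key : ∀ (l : List Int) (acc : List (String × String)),
      l.foldl (fun acc i => (PySem.List.pyRange (i + 1) n).foldl (fun acc j =>
        if PySem.List.pyGetD sigs i none == PySem.List.pyGetD sigs j none then
          acc ++ [(PySem.Int.toStr i, PySem.Int.toStr j)] else acc) acc) acc
      = acc ++ l.flatMap (fun i => ((PySem.List.pyRange (i + 1) n).filter (fun j =>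
          PySem.List.pyGetD sigs i none == PySem.List.pyGetD sigs j none)).map
          (fun j => (PySem.Int.toStr i, PySem.Int.toStr j))) := by
    intro l
    induction l with
    | nil => intro acc; simp
    | cons x t ih =>
      intro acc
      rw [List.foldl_cons, PySem.List.foldl_append_if, ih, List.flatMap_cons,
        List.append_assoc]
  unfold pvBPairs
  rw [key, List.nil_append]

theorem pv_pairs_eq (N : Int) (worlds : List (String × List Int))
    (hn : 2 ≤ (worlds.length : Int))
    (hw : ∀ w ∈ worlds, 2 ≤ w.2.length ∧ (pvEvil w).1 ≠ (pvEvil w).2 ∧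
      0 ≤ (pvEvil w).1 ∧ (pvEvil w).1 < N ∧ 0 ≤ (pvEvil w).2 ∧ (pvEvil w).2 < N)
    {a : Int} (ha : a ∈ pvAgents N) :
    ((pvAllEvts N worlds (PySem.List.len worlds)).filter
        (fun p => p.1 == PySem.Int.toStr a)).map (fun p => p.2)
      = pvBPairs (PySem.List.len worlds) (pvSigList worlds a) := by
  have hlen : PySem.List.len worlds = (worlds.length : Int) := rfl
  have ha' : 0 ≤ a ∧ a < N := PySem.List.mem_pyRange_one.mp ha
  have hfacts : ∀ {i : Int}, 0 ≤ i → i < (worlds.length : Int) →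
      (pvEvil (pvWAt worlds i)).1 ≠ (pvEvil (pvWAt worlds i)).2 ∧
      (0 ≤ (pvEvil (pvWAt worlds i)).1 ∧ (pvEvil (pvWAt worlds i)).1 < N) ∧
      (0 ≤ (pvEvil (pvWAt worlds i)).2 ∧ (pvEvil (pvWAt worlds i)).2 < N) := by
    intro i h0 h1
    obtain ⟨-, hne, u1, u2, v1, v2⟩ := hw _ (pv_wAt_mem worlds h0 h1)
    exact ⟨hne, ⟨u1, u2⟩, v1, v2⟩
  rw [pv_bPairs_flatMap]
  unfold pvAllEvts
  rw [List.filter_flatMap, List.map_flatMap]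
  have hsplit : PySem.List.pyRange 0 (PySem.List.len worlds) =
      PySem.List.pyRange 0 (PySem.List.len worlds - 1) ++ [PySem.List.len worlds - 1] := by
    have h := PySem.List.pyRange_one_succ_right (a := 0) (b := PySem.List.len worlds - 1)
      (by rw [hlen]; omega)
    rw [show PySem.List.len worlds - 1 + 1 = PySem.List.len worlds by omega] at h
    exact h
  rw [hsplit, List.flatMap_append]
  have hlast : ([PySem.List.len worlds - 1] : List Int).flatMap (fun i =>
      ((PySem.List.pyRange (i + 1) (PySem.List.len worlds)).filter (fun j =>
        PySem.List.pyGetD (pvSigList worlds a) i none ==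
          PySem.List.pyGetD (pvSigList worlds a) j none)).map
        (fun j => (PySem.Int.toStr i, PySem.Int.toStr j))) = [] := by
    rw [List.flatMap_singleton, pv_pyRange_nil (by omega)]
    rfl
  rw [hlast, List.append_nil]
  apply List.flatMap_congr
  intro i hi
  obtain ⟨hi0, hi1⟩ := PySem.List.mem_pyRange_one.mp hi
  rw [hlen] at hi1
  rw [List.filter_flatMap, List.map_flatMap]
  rw [pv_map_filter_eq_flatMap]
  apply List.flatMap_congr
  intro j hj
  obtain ⟨hj0, hj1⟩ := PySem.List.mem_pyRange_one.mp hj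
  rw [hlen] at hj1
  have hi1' : i < (worlds.length : Int) := by omega
  have hj0' : (0:Int) ≤ j := by omega
  rw [pv_sig_at worlds a hi0 hi1', pv_sig_at worlds a hj0' hj1]
  obtain ⟨hne_i, hre_i, hrf_i⟩ := hfacts hi0 hi1'
  obtain ⟨hne_j, hre_j, hrf_j⟩ := hfacts hj0' hj1
  have h := pv_perPair (N := N) (a := a) i j ha' hne_i hre_i hrf_i hne_j hre_j hrf_j
  rw [h]
  rfl

/-! ### Keys are preserved -/

theorem pv_evts_key_mem {N : Int} {i j e1 f1 e2 f2 : Int}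
    (re1 : 0 ≤ e1 ∧ e1 < N) (rf1 : 0 ≤ f1 ∧ f1 < N) :
    ∀ p ∈ pvEvts N i j e1 f1 e2 f2, p.1 ∈ pvKeys N := by
  intro p hp
  unfold pvEvts at hp
  rcases List.mem_append.mp hp with hp | hp
  · have hor : p = (PySem.Int.toStr e1, pvP i j) ∨ p = (PySem.Int.toStr f1, pvP i j) := by
      revert hp
      split
      · intro hp; simpa using hp
      · intro hp; cases hp
    rcases hor with rfl | rfl
    · exact List.mem_map_of_mem (PySem.List.mem_pyRange_one.mpr ⟨re1.1, re1.2⟩)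
    · exact List.mem_map_of_mem (PySem.List.mem_pyRange_one.mpr ⟨rf1.1, rf1.2⟩)
  · rcases List.mem_map.mp hp with ⟨g, hg, rfl⟩
    exact List.mem_map_of_mem
      (pv_goodA_subset N e1 f1 g (List.mem_filter.mp hg).1)

theorem pv_allEvts_keys (N : Int) (worlds : List (String × List Int))
    (hw : ∀ w ∈ worlds, 2 ≤ w.2.length ∧ (pvEvil w).1 ≠ (pvEvil w).2 ∧
      0 ≤ (pvEvil w).1 ∧ (pvEvil w).1 < N ∧ 0 ≤ (pvEvil w).2 ∧ (pvEvil w).2 < N) :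
    ∀ p ∈ pvAllEvts N worlds (PySem.List.len worlds), p.1 ∈ pvKeys N := by
  have hlen : PySem.List.len worlds = (worlds.length : Int) := rfl
  intro p hp
  unfold pvAllEvts at hp
  rcases List.mem_flatMap.mp hp with ⟨i, hi, hp⟩
  rcases List.mem_flatMap.mp hp with ⟨j, hj, hp⟩
  obtain ⟨hi0, hi1⟩ := PySem.List.mem_pyRange_one.mp hi
  rw [hlen] at hi1
  have hi1' : i < (worlds.length : Int) := by omega
  obtain ⟨-, -, u1, u2, v1, v2⟩ := hw _ (pv_wAt_mem worlds hi0 hi1')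
  exact pv_evts_key_mem ⟨u1, u2⟩ ⟨v1, v2⟩ p hp

/-! ### The conversion pass and final assembly -/

theorem pv_conv_items (N : Int) (d : PySem.Dict String (List (String × String)))
    (hk : d.keys = pvKeys N) :
    ((PySem.List.pyRange 0 (d.size : Int)).foldl (fun d idx =>
        d.insert (PySem.Int.toStr idx)
          (PySem.Set.ofList ((d.get? (PySem.Int.toStr idx)).getD []))) d).items
      = (pvAgents N).map (fun a =>
          (PySem.Int.toStr a, PySem.Set.ofList (d.getD (PySem.Int.toStr a) []))) := by
  have hsize : (d.size : Int) = ((pvAgents N).length : Int) := by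
    have h1 : d.size = d.items.length := rfl
    have h2 : d.keys.length = d.items.length := by
      show (d.items.map Prod.fst).length = d.items.length
      exact List.length_map ..
    have h3 : d.keys.length = (pvAgents N).length := by
      rw [hk]
      exact List.length_map ..
    omega
  have hrange : PySem.List.pyRange 0 (d.size : Int) = pvAgents N := by
    rw [hsize]
    exact pv_agents_len N
  rw [hrange]
  have hkeys : ((pvAgents N).foldl (fun d idx =>
      d.insert (PySem.Int.toStr idx)
        (PySem.Set.ofList ((d.get? (PySem.Int.toStr idx)).getD []))) d).keys = pvKeys N := by
    rw [PySem.Dict.keys_foldl_insert_key (pvAgents N) PySem.Int.toStr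
      (fun d idx => PySem.Set.ofList ((d.get? (PySem.Int.toStr idx)).getD [])) d, hk]
    exact pv_update_subset _ _ (fun x hx => hx)
  rw [PySem.Dict.items_eq_map_keys _ (hkeys ▸ pv_nodup_keys N) [], hkeys]
  unfold pvKeys
  rw [List.map_map]
  apply List.map_congr_left
  intro a ha
  have h := pv_getD_foldl_insert_read (pvAgents N) PySem.Int.toStr PySem.Set.ofList
    d a [] (pv_nodup_keys N) ha
  simp only [Function.comp]
  rw [h]

theorem pv_main (N : Int) (worlds : List (String × List Int))
    (hPre : Pre_generate_all_relations N worlds) :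
    generate_all_relations N worlds = generate_all_relations_alt N worlds := by
  have hlen : PySem.List.len worlds = (worlds.length : Int) := rfl
  have hA : generate_all_relations N worlds =
      ((PySem.List.pyRange 0 ((pvRel1 N worlds).size : Int)).foldl (fun d idx =>
        d.insert (PySem.Int.toStr idx)
          (PySem.Set.ofList ((d.get? (PySem.Int.toStr idx)).getD []))) (pvRel1 N worlds)).items :=
    rfl
  have hB : generate_all_relations_alt N worlds =
      if 2 ≤ PySem.List.len worlds then
        ((pvAgents N).foldl (fun d a =>
          d.insert (PySem.Int.toStr a)
            (PySem.Set.ofList (pvBPairs (PySem.List.len worlds) (pvSigList worlds a))))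
          (pvRel0 N)).items
      else (pvRel0 N).items := rfl
  by_cases hn : 2 ≤ PySem.List.len worlds
  · have hw : ∀ w ∈ worlds, 2 ≤ w.2.length ∧ (pvEvil w).1 ≠ (pvEvil w).2 ∧
        0 ≤ (pvEvil w).1 ∧ (pvEvil w).1 < N ∧ 0 ≤ (pvEvil w).2 ∧ (pvEvil w).2 < N := by
      rcases hPre with h | h
      · exfalso; rw [hlen] at hn; omega
      · exact h
    have hrel1 := pv_rel1_eq N worlds
    have hkeys1 : (pvRel1 N worlds).keys = pvKeys N := by
      rw [hrel1]
      rw [PySem.Dict.keys_foldl_modify_key (pvAllEvts N worlds (PySem.List.len worlds))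
        Prod.fst [] (fun _ p => fun v => v ++ [p.2]) (pvRel0 N)]
      rw [pv_rel0_keys]
      apply pv_update_subset
      intro k hk
      rcases List.mem_map.mp hk with ⟨p, hp, rfl⟩
      exact pv_allEvts_keys N worlds hw p hp
    rw [hA, pv_conv_items N (pvRel1 N worlds) hkeys1, hB, if_pos hn]
    have hkeysB : ((pvAgents N).foldl (fun d a =>
        d.insert (PySem.Int.toStr a)
          (PySem.Set.ofList (pvBPairs (PySem.List.len worlds) (pvSigList worlds a))))
        (pvRel0 N)).keys = pvKeys N := by
      rw [PySem.Dict.keys_foldl_insert_key (pvAgents N) PySem.Int.toStr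
        (fun _ a => PySem.Set.ofList (pvBPairs (PySem.List.len worlds) (pvSigList worlds a)))
        (pvRel0 N), pv_rel0_keys]
      exact pv_update_subset _ _ (fun x hx => hx)
    rw [PySem.Dict.items_eq_map_keys _ (hkeysB ▸ pv_nodup_keys N) [], hkeysB]
    unfold pvKeys
    rw [List.map_map]
    apply List.map_congr_left
    intro a ha
    have hBval := pv_getD_foldl_insert_mem (pvAgents N) PySem.Int.toStr
      (fun a => PySem.Set.ofList (pvBPairs (PySem.List.len worlds) (pvSigList worlds a)))
      (pvRel0 N) a [] (pv_nodup_keys N) ha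
    simp only [Function.comp]
    rw [hBval]
    have hgetd : (pvRel1 N worlds).getD (PySem.Int.toStr a) [] =
        ((pvAllEvts N worlds (PySem.List.len worlds)).filter
          (fun p => p.1 == PySem.Int.toStr a)).map (fun p => p.2) := by
      rw [hrel1, PySem.Dict.getD_foldl_modify_append, pv_rel0_getD N ha, List.nil_append]
    rw [hgetd, pv_pairs_eq N worlds (hlen ▸ hn) hw ha]
  · have hr10 : pvRel1 N worlds = pvRel0 N := by
      unfold pvRel1
      rw [pv_pyRange_nil (a := 0) (b := PySem.List.len worlds - 1) (by rw [hlen] at hn ⊢; omega)]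
      rfl
    rw [hA, hr10, pv_conv_items N (pvRel0 N) (pv_rel0_keys N), hB, if_neg hn, pv_rel0_items N]
    apply List.map_congr_left
    intro a ha
    rw [pv_rel0_getD N ha]
    rfl

-- ===== VERDICT (by name: the statement is the Claim_ definition above) =====
theorem generate_all_relations_spec : Claim_equal_generate_all_relations := by
  intro num_agents worlds _hDom hPre
  unfold Spec_generate_all_relations
  exact pv_main num_agents worlds hPre
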